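-- pv_equiv track=rewrite | github.com/AnastasiiaBoryslavska/leetcode | Python/2294_partition_array_such_that_maximum_difference_is_k.py | partitionArray
-- ===== SOURCE A (Python) =====
-- from typing import List
--
-- def partitionArray(nums: List[int], k: int) -> int:
--     nums.sort()
--     ans = 1
--     min_value = nums[0]
--
--     for num in nums[1:]:
--         if num - min_value > k:
--             ans += 1
--             min_value = num
--
--     return ans
-- ===== SOURCE B (Python) =====
-- import bisect
-- from typing import List
--
-- def partitionArray(nums: List[int], k: int) -> int:
--     # Sort, then jump group-by-group: each group starts at index i and ends
--     # before the first index > i whose value exceeds nums[i] + k, found by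
--     # binary search (searching from i+1 guarantees progress for any k).
--     nums.sort()
--     ans = 0
--     i = 0
--     n = len(nums)
--     while i < n:
--         ans += 1
--         i = bisect.bisect_right(nums, nums[i] + k, i + 1)
--     return ans
-- ===== Notes on version B (the rewrite author's own statement) =====
-- stated objective: alternative
-- what changed: After the same in-place sort, B replaces A's element-by-element scan carrying a running group minimum with a group-by-group loop that binary-searches (bisect_right from i+1) for each group's end, doing O(log n) work per group instead of O(1) work per element; Pre_ excludes only the empty list, where A raises IndexError at nums[0] while B returns 0.
import Mathlib
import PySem

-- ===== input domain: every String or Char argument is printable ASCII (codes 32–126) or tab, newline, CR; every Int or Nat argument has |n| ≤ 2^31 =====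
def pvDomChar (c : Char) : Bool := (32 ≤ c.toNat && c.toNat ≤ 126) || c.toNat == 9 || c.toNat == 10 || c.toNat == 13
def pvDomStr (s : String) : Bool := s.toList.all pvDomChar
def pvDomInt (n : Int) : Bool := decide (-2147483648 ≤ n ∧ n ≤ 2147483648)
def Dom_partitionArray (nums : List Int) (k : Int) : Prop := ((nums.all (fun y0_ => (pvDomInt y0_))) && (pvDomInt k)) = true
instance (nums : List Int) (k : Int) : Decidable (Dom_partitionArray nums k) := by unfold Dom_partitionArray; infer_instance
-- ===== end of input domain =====

-- B keeps A's sort but counts groups by binary-search jumps instead of an element scan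
-- (alternative decomposition, same asymptotic cost). Both A and B sort `nums` in place in
-- Python; the equivalence proved here is about the return value.

-- ===== PORT A =====
-- the for-loop over nums[1:] with mutable (ans, min_value)
def pvGoA (k : Int) : List Int → Int → Int → Int
  | [], ans, _ => ans
  | num :: rest, ans, mv =>
      if num - mv > k then pvGoA k rest (ans + 1) num else pvGoA k rest ans mv

def partitionArray (nums : List Int) (k : Int) : Int :=
  let s := PySem.List.sorted nums (fun x => x) false   -- nums.sort()
  -- nums[0]; Pre_ excludes the empty list, where Python raises IndexError
  let mv := (PySem.List.pyGet? s 0).getD 0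
  pvGoA k (PySem.List.slice s (some 1) none) 1 mv      -- for num in nums[1:]

-- ===== PORT B =====
-- the while loop; bisect.bisect_right(nums, x, i+1) is ported as
-- i + 1 + bisectRight (s.drop (i+1)) x (the lo-parameter form of bisect_right)
def pvLoopB (s : List Int) (k : Int) (i : Nat) (ans : Int) : Int :=
  if h : i < s.length then
    pvLoopB s k (i + 1 + PySem.List.bisectRight (s.drop (i + 1)) (s[i] + k)) (ans + 1)
  else ans
  termination_by s.length - i
  decreasing_by omega

def partitionArray_alt (nums : List Int) (k : Int) : Int :=
  let s := PySem.List.sorted nums (fun x => x) false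
  pvLoopB s k 0 0

-- ===== PRECONDITION & SPEC =====
-- Pre_ excludes only the empty list, on which A raises IndexError at nums[0].
def Pre_partitionArray (nums : List Int) (_k : Int) : Prop := nums ≠ []
instance (nums : List Int) (k : Int) : Decidable (Pre_partitionArray nums k) := by
  unfold Pre_partitionArray; infer_instance

def pvWitness_partitionArray : List Int × Int := ([1, 2, 5], 2)

def Spec_partitionArray (nums : List Int) (k : Int) (out : Int) : Prop := out = partitionArray_alt nums k
instance (nums : List Int) (k : Int) (out : Int) : Decidable (Spec_partitionArray nums k out) := by unfold Spec_partitionArray; infer_instance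

-- ===== CLAIM (what is proved, stated in full; the proofs are below) =====
def Claim_equal_partitionArray : Prop := ∀ (nums : List Int) (k : Int), Dom_partitionArray nums k → Pre_partitionArray nums k → Spec_partitionArray nums k (partitionArray nums k)

-- ===== LEMMAS AND PROOFS =====

-- number of groups the greedy partition makes on a (sorted) list
def pvGroups (k : Int) : List Int → Int
  | [] => 0
  | x :: xs => 1 + pvGroups k (xs.dropWhile (fun v => decide (v ≤ x + k)))
  termination_by l => l.length
  decreasing_by
    have := List.length_dropWhile_le (fun v => decide (v ≤ x + k)) xs
    simp; omega

theorem pvGoA_eq_groups (k : Int) (t : List Int) (m ans : Int) :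
    pvGoA k t ans m = ans + pvGroups k (t.dropWhile (fun v => decide (v ≤ m + k))) := by
  induction t generalizing m ans with
  | nil => simp [pvGoA, pvGroups]
  | cons x xs ih =>
      by_cases hx : x - m > k
      · have hx' : ¬ (x ≤ m + k) := by omega
        simp only [pvGoA, if_pos hx, List.dropWhile, hx', decide_false]
        rw [ih x (ans + 1), pvGroups]
        ring
      · have hx' : x ≤ m + k := by omega
        simp only [pvGoA, if_neg hx, List.dropWhile, hx', decide_true]
        exact ih m ans

theorem pvDropWhile_eq_drop {p : Int → Bool} :
    ∀ (t : List Int) (b : Nat), b ≤ t.length →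
    (∀ (j : Nat) (hj : j < t.length), j < b → p t[j]) →
    (∀ (j : Nat) (hj : j < t.length), b ≤ j → ¬ p t[j]) →
    t.dropWhile p = t.drop b := by
  intro t
  induction t with
  | nil => intro b hb _ _; simp at hb; simp [hb]
  | cons y ys ih =>
      intro b hb h1 h2
      cases b with
      | zero =>
          have : ¬ p y := h2 0 (by simp) (by omega)
          simp [List.dropWhile, this]
      | succ b' =>
          have hy : p y = true := h1 0 (by simp) (by omega)
          simp only [List.dropWhile, hy, List.drop_succ_cons]
          exact ih b' (by simpa using hb)
            (fun j hj hjb => h1 (j + 1) (by simpa using Nat.succ_lt_succ hj) (by omega))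
            (fun j hj hjb => h2 (j + 1) (by simpa using Nat.succ_lt_succ hj) (by omega))

theorem pvDrop_bisect (t : List Int) (x : Int) (hs : t.Pairwise (· ≤ ·)) :
    t.drop (PySem.List.bisectRight t x) = t.dropWhile (fun v => decide (v ≤ x)) := by
  obtain ⟨hle, hbefore, hafter⟩ := PySem.List.bisectRight_spec t x hs
  rw [pvDropWhile_eq_drop t (PySem.List.bisectRight t x) hle]
  · intro j hj hjb; simpa using hbefore j hj hjb
  · intro j hj hjb; simp only [decide_eq_true_eq]; push Not; exact hafter j hj hjb

theorem pvLoopB_eq_groups (s : List Int) (k : Int) (hs : s.Pairwise (· ≤ ·)) :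
    ∀ (n i : Nat) (ans : Int), s.length - i ≤ n →
    pvLoopB s k i ans = ans + pvGroups k (s.drop i) := by
  intro n
  induction n with
  | zero =>
      intro i ans hn
      have hi : ¬ i < s.length := by omega
      rw [pvLoopB, dif_neg hi, List.drop_eq_nil_of_le (by omega), pvGroups]
      ring
  | succ n ih =>
      intro i ans hn
      by_cases hi : i < s.length
      · rw [pvLoopB, dif_pos hi]
        rw [ih (i + 1 + PySem.List.bisectRight (s.drop (i + 1)) (s[i] + k)) (ans + 1)
          (by
            have := (PySem.List.bisectRight_spec (s.drop (i + 1)) (s[i] + k)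
              (hs.sublist (List.drop_sublist _ _))).1
            simp only [List.length_drop] at this
            omega)]
        have hdd : s.drop (i + 1 + PySem.List.bisectRight (s.drop (i + 1)) (s[i] + k))
            = (s.drop (i + 1)).drop (PySem.List.bisectRight (s.drop (i + 1)) (s[i] + k)) :=
          List.drop_drop.symm
        rw [hdd, pvDrop_bisect _ _ (hs.sublist (List.drop_sublist _ _))]
        rw [List.drop_eq_getElem_cons hi, pvGroups]
        ring
      · rw [pvLoopB, dif_neg hi, List.drop_eq_nil_of_le (by omega), pvGroups]
        ring

-- ===== VERDICT (by name: the statement is the Claim_ definition above) =====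
theorem partitionArray_spec : Claim_equal_partitionArray := by
  intro nums k _ hpre
  unfold Spec_partitionArray
  have key : ∀ (s : List Int), s ≠ [] → s.Pairwise (· ≤ ·) →
      pvGoA k (PySem.List.slice s (some 1) none) 1 ((PySem.List.pyGet? s 0).getD 0)
        = pvLoopB s k 0 0 := by
    intro s hsnil hs
    obtain ⟨m, t, hmt⟩ := List.exists_cons_of_ne_nil hsnil
    subst hmt
    rw [PySem.List.slice_from_one]
    simp only [PySem.List.pyGet?_zero_cons, Option.getD_some, List.tail_cons]
    rw [pvGoA_eq_groups,
        pvLoopB_eq_groups (m :: t) k hs (m :: t).length 0 0 (by omega)]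
    simp [pvGroups]
  simp only [partitionArray, partitionArray_alt]
  exact key _ (by rw [Ne, PySem.List.sorted_eq_nil_iff]; exact hpre)
    (PySem.List.sorted_pairwise nums (fun x => x))
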